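-- pv_equiv track=rewrite | github.com/Negadiay/AOIS | Lab2/main/main.py | get_index_form
-- ===== SOURCE A (Python) =====
-- def str_len(s):
--     count = 0
--     try:
--         while True:
--             _ = s[count]
--             count += 1
--     except:
--         return count
--
-- def list_len(lst):
--     count = 0
--     try:
--         while True:
--             _ = lst[count]
--             count += 1
--     except:
--         return count
--
-- def get_index_form(table):
--     binary = ''
--     i = 0
--     while i < list_len(table):
--         binary += str(table[i][1])
--         i += 1
--     decimal = 0
--     i = 0
--     while i < str_len(binary):
--         if binary[i] == '1':
--             power = str_len(binary) - i - 1
--             decimal += 2 ** power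
--         i += 1
--     return decimal, binary
-- ===== SOURCE B (Python) =====
-- def get_index_form(table):
--     # Single fused pass: build the binary string and fold the decimal
--     # value with Horner's rule per appended character.
--     binary = ''
--     decimal = 0
--     for row in table:
--         s = str(row[1])
--         binary += s
--         for c in s:
--             decimal = decimal * 2 + (1 if c == '1' else 0)
--     return decimal, binary
-- ===== Notes on version B (the rewrite author's own statement) =====
-- stated objective: faster
-- what changed: Replaced A's two sequential index-loops (string build, then a positional 2**power scan over the string) with one fused per-row pass that folds the decimal with Horner's rule (decimal = decimal*2 + bit) as each character is appended.
import Mathlib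
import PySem

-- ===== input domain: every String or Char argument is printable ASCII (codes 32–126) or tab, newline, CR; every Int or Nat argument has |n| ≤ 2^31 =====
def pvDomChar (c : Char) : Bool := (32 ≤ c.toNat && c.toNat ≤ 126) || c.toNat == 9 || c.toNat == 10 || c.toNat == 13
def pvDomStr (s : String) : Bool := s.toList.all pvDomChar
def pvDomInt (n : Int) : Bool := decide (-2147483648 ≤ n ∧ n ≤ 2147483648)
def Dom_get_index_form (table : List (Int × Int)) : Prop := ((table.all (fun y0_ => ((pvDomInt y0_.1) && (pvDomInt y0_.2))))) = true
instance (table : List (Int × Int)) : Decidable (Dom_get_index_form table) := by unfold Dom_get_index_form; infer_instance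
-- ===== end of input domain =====

-- B fuses A's two loops into one per-row pass, folding the decimal with Horner's rule; same return value.

-- ===== PORT A =====
-- A's second while loop: at position i the power is len - i - 1, i.e. the length of the rest.
def pvDecA : List Char → Int
  | [] => 0
  | c :: cs => (if c = '1' then (2 : Int) ^ cs.length else 0) + pvDecA cs

def get_index_form (table : List (Int × Int)) : Int × String :=
  let binary := table.foldl (fun b p => b ++ PySem.Int.toChars p.2) []
  (pvDecA binary, String.ofList binary)

-- ===== PORT B =====
def pvStep (d : Int) (c : Char) : Int := d * 2 + (if c = '1' then 1 else 0)

def get_index_form_alt (table : List (Int × Int)) : Int × String :=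
  let st := table.foldl (fun st p =>
    let cs := PySem.Int.toChars p.2
    (cs.foldl pvStep st.1, st.2 ++ cs)) ((0 : Int), ([] : List Char))
  (st.1, String.ofList st.2)

-- ===== PRECONDITION & SPEC =====
def Spec_get_index_form (table : List (Int × Int)) (out : Int × String) : Prop := out = get_index_form_alt table
instance (table : List (Int × Int)) (out : Int × String) : Decidable (Spec_get_index_form table out) := by unfold Spec_get_index_form; infer_instance

-- ===== CLAIM (what is proved, stated in full; the proofs are below) =====
def Claim_equal_get_index_form : Prop := ∀ (table : List (Int × Int)), Dom_get_index_form table → Spec_get_index_form table (get_index_form table)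

-- ===== LEMMAS AND PROOFS =====

-- Horner fold = A's positional-power sum, with the accumulator shifted in.
theorem pvHorner_eq (cs : List Char) : ∀ d : Int, cs.foldl pvStep d = d * 2 ^ cs.length + pvDecA cs := by
  induction cs with
  | nil => intro d; simp [pvDecA]
  | cons c cs ih =>
    intro d
    simp only [List.foldl_cons, ih, pvDecA, pvStep, List.length_cons]
    split_ifs <;> ring

theorem pvB_fold (table : List (Int × Int)) : ∀ (d : Int) (b : List Char),
    table.foldl (fun st p =>
      ((PySem.Int.toChars p.2).foldl pvStep st.1, st.2 ++ PySem.Int.toChars p.2)) (d, b)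
    = ((table.flatMap (fun p => PySem.Int.toChars p.2)).foldl pvStep d,
       b ++ table.flatMap (fun p => PySem.Int.toChars p.2)) := by
  induction table with
  | nil => intro d b; simp
  | cons p t ih =>
    intro d b
    simp only [List.foldl_cons, ih, List.flatMap_cons, List.foldl_append, List.append_assoc]

-- ===== VERDICT (by name: the statement is the Claim_ definition above) =====
theorem get_index_form_spec : Claim_equal_get_index_form := by
  intro table _
  unfold Spec_get_index_form get_index_form get_index_form_alt
  rw [PySem.List.foldl_append_eq_flatMap, pvB_fold]
  simp [pvHorner_eq]
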